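-- pv_equiv track=rewrite | github.com/lishrenior/intrusion-detection-prevention-system | IDS/intrusion-detection/IDS.py | match_flag_tcp
-- ===== SOURCE A (Python) =====
-- def match_flag_tcp(packet_flags, rule_flags):
--     flag_mapping = {
--         'S': 0x02,  # SYN
--         'A': 0x10,  # ACK
--         'F': 0x01,  # FIN
--         'R': 0x04   # RST
--     }
--
--     for flag in rule_flags:
--         if flag not in flag_mapping:
--             return False
--
--         required_flag_value = flag_mapping[flag]
--         if (packet_flags & required_flag_value) == 0:  #flag is not set
--             return False
--
--     return True
-- ===== SOURCE B (Python) =====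
-- def match_flag_tcp(packet_flags, rule_flags):
--     flag_mapping = {
--         'S': 0x02,  # SYN
--         'A': 0x10,  # ACK
--         'F': 0x01,  # FIN
--         'R': 0x04   # RST
--     }
--
--     # Build one combined required bitmask, rejecting unknown flag letters.
--     mask = 0
--     for flag in rule_flags:
--         if flag not in flag_mapping:
--             return False
--         mask |= flag_mapping[flag]
--
--     # All required flags are set iff the whole mask survives the AND.
--     return (packet_flags & mask) == mask
-- ===== Notes on version B (the rewrite author's own statement) =====
-- stated objective: simpler
-- what changed: Instead of testing each rule flag's bit against packet_flags inside the loop, B first folds all rule flags into one required bitmask (rejecting unknown letters) and then decides the match with a single whole-mask AND-equality test.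
import Mathlib
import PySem

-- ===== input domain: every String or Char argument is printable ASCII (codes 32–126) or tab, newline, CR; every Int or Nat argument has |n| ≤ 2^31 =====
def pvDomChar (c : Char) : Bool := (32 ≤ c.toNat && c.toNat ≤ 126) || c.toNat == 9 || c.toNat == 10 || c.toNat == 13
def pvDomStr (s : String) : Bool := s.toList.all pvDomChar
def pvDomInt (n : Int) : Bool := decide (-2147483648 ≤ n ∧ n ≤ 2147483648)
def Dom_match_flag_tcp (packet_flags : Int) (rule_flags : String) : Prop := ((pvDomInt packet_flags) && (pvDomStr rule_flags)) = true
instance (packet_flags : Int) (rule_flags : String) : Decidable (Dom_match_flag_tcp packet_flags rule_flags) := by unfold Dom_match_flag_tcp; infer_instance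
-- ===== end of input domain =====

-- B replaces A's per-flag "is this bit set" test inside the loop by first folding all rule
-- flags into one required bitmask and then doing a single whole-mask AND-equality test (simpler).

-- ===== PORT A =====
-- the dict literal 'flag_mapping'
def flagMapping : PySem.Dict Char Int :=
  PySem.Dict.ofList [('S', 2), ('A', 16), ('F', 1), ('R', 4)]

-- the 'for flag in rule_flags' loop; 'flag not in flag_mapping' and the subscript
-- 'flag_mapping[flag]' are the none/some cases of the same lookup
def matchFlagLoop (packet_flags : Int) : List Char → Bool
  | [] => true
  | flag :: rest =>
    match flagMapping.get? flag with
    | none => false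
    | some required_flag_value =>
      if PySem.Int.band packet_flags required_flag_value = 0 then false
      else matchFlagLoop packet_flags rest

def match_flag_tcp (packet_flags : Int) (rule_flags : String) : Bool :=
  matchFlagLoop packet_flags rule_flags.toList

-- ===== PORT B =====
-- B's dict as an association list (first-match lookup)
def flagBitsB : List (Char × Int) := [('S', 2), ('A', 16), ('F', 1), ('R', 4)]

-- the mask-building loop: 'mask |= flag_mapping[flag]', None = early 'return False'
def buildMask : Int → List Char → Option Int
  | mask, [] => some mask
  | mask, c :: rest =>
    match flagBitsB.lookup c with
    | none => none
    | some v => buildMask (PySem.Int.bor mask v) rest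

def match_flag_tcp_alt (packet_flags : Int) (rule_flags : String) : Bool :=
  match buildMask 0 rule_flags.toList with
  | none => false
  | some mask => decide (PySem.Int.band packet_flags mask = mask)

-- ===== PRECONDITION & SPEC =====
def Spec_match_flag_tcp (packet_flags : Int) (rule_flags : String) (out : Bool) : Prop := out = match_flag_tcp_alt packet_flags rule_flags
instance (packet_flags : Int) (rule_flags : String) (out : Bool) : Decidable (Spec_match_flag_tcp packet_flags rule_flags out) := by unfold Spec_match_flag_tcp; infer_instance

-- ===== CLAIM (what is proved, stated in full; the proofs are below) =====
def Claim_equal_match_flag_tcp : Prop := ∀ (packet_flags : Int) (rule_flags : String), Dom_match_flag_tcp packet_flags rule_flags → Spec_match_flag_tcp packet_flags rule_flags (match_flag_tcp packet_flags rule_flags)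

-- ===== LEMMAS AND PROOFS =====

-- "all bits of the (nonnegative) mask m are set in p"
def psat (p : Int) (m : Nat) : Prop := PySem.Int.band p (m : Int) = (m : Int)

-- PySem.Int.band of an Int with a Nat cast, unfolded to the two sign cases
theorem band_natCast_cases (p : Int) (m : Nat) :
    PySem.Int.band p (m : Int) =
      if 0 ≤ p then ((p.toNat &&& m : Nat) : Int)
      else ((m - (m &&& (-p - 1).toNat) : Nat) : Int) := by
  simp only [PySem.Int.band, Int.natCast_nonneg, if_true, Int.toNat_natCast]

theorem nat_and_eq_zero_iff (x q : Nat) :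
    x &&& q = 0 ↔ ∀ k, (x.testBit k && q.testBit k) = false := by
  constructor
  · intro h k
    have := congrArg (fun n => n.testBit k) h
    simpa [Nat.testBit_and] using this
  · intro h
    apply Nat.eq_of_testBit_eq
    intro k
    simp [Nat.testBit_and, Nat.zero_testBit]
    have := h k
    simpa [Nat.testBit_and] using this

theorem nat_and_sup_iff (n a b : Nat) :
    n &&& (a ||| b) = (a ||| b) ↔ (n &&& a = a ∧ n &&& b = b) := by
  constructor
  · intro h
    have hk : ∀ k, (n.testBit k && (a.testBit k || b.testBit k)) = (a.testBit k || b.testBit k) := by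
      intro k
      have := congrArg (fun x => x.testBit k) h
      simpa [Nat.testBit_and, Nat.testBit_or] using this
    constructor
    · apply Nat.eq_of_testBit_eq
      intro k
      have := hk k
      simp only [Nat.testBit_and]
      cases ha : a.testBit k <;> cases hb : b.testBit k <;> cases hn : n.testBit k <;> simp_all
    · apply Nat.eq_of_testBit_eq
      intro k
      have := hk k
      simp only [Nat.testBit_and]
      cases ha : a.testBit k <;> cases hb : b.testBit k <;> cases hn : n.testBit k <;> simp_all
  · rintro ⟨h1, h2⟩
    apply Nat.eq_of_testBit_eq
    intro k
    have hk1 := congrArg (fun x => x.testBit k) h1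
    have hk2 := congrArg (fun x => x.testBit k) h2
    simp only [Nat.testBit_and] at hk1 hk2
    simp only [Nat.testBit_and, Nat.testBit_or]
    cases ha : a.testBit k <;> cases hb : b.testBit k <;> cases hn : n.testBit k <;> simp_all

theorem psat_zero (p : Int) : psat p 0 := by
  simp [psat, PySem.Int.band_zero]

theorem psat_or (p : Int) (a b : Nat) : psat p (a ||| b) ↔ psat p a ∧ psat p b := by
  unfold psat
  rw [band_natCast_cases, band_natCast_cases, band_natCast_cases]
  by_cases hp : 0 ≤ p
  · simp only [hp, if_true, Nat.cast_inj]
    exact nat_and_sup_iff _ _ _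
  · simp only [hp, if_false, Nat.cast_inj]
    have hle : ∀ x : Nat, x - (x &&& (-p - 1).toNat) = x ↔ x &&& (-p - 1).toNat = 0 := by
      intro x
      have := Nat.and_le_left (n := x) (m := (-p - 1).toNat)
      omega
    rw [hle, hle, hle, nat_and_eq_zero_iff, nat_and_eq_zero_iff, nat_and_eq_zero_iff]
    constructor
    · intro h
      constructor <;> intro k <;> have := h k <;>
        simp only [Nat.testBit_or] at this <;>
        cases ha : a.testBit k <;> cases hb : b.testBit k <;> simp_all
    · rintro ⟨h1, h2⟩ k
      have := h1 k; have := h2 k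
      simp only [Nat.testBit_or]
      cases ha : a.testBit k <;> cases hb : b.testBit k <;> simp_all

theorem band_pow_dichotomy (p : Int) (j : Nat) :
    PySem.Int.band p ((2 ^ j : Nat) : Int) = ((2 ^ j : Nat) : Int) ∨
    PySem.Int.band p ((2 ^ j : Nat) : Int) = 0 := by
  rw [band_natCast_cases]
  by_cases hp : 0 ≤ p
  · simp only [hp, if_true]
    rw [Nat.and_two_pow]
    cases h : p.toNat.testBit j <;> simp
  · simp only [hp, if_false]
    rw [Nat.and_comm, Nat.and_two_pow]
    cases h : (-p - 1).toNat.testBit j <;> simp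

theorem psat_pow_iff (p : Int) (j : Nat) :
    psat p (2 ^ j) ↔ PySem.Int.band p ((2 ^ j : Nat) : Int) ≠ 0 := by
  constructor
  · intro h
    rw [psat] at h
    rw [h]
    have : (0 : Nat) < 2 ^ j := Nat.two_pow_pos j
    exact_mod_cast this.ne'
  · intro h
    rcases band_pow_dichotomy p j with h1 | h1
    · exact h1
    · exact absurd h1 h

theorem or_absorb_of_testBit (m j : Nat) (h : m.testBit j = true) : m ||| 2 ^ j = m := by
  apply Nat.eq_of_testBit_eq
  intro k
  simp only [Nat.testBit_or, Nat.testBit_two_pow]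
  by_cases hk : j = k
  · subst hk; simp [h]
  · simp [hk]

-- the two ports look a flag letter up the same way
theorem lookup_cases (c : Char) :
    (flagMapping.get? c = none ∧ flagBitsB.lookup c = none) ∨
    (∃ j : Nat, flagMapping.get? c = some ((2 ^ j : Nat) : Int) ∧
      flagBitsB.lookup c = some ((2 ^ j : Nat) : Int)) := by
  by_cases hS : c = 'S'
  · subst hS; right; exact ⟨1, by decide, by decide⟩
  by_cases hA : c = 'A'
  · subst hA; right; exact ⟨4, by decide, by decide⟩
  by_cases hF : c = 'F'
  · subst hF; right; exact ⟨0, by decide, by decide⟩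
  by_cases hR : c = 'R'
  · subst hR; right; exact ⟨2, by decide, by decide⟩
  left
  have eS : (c == 'S') = false := by simp [hS]
  have eA : (c == 'A') = false := by simp [hA]
  have eF : (c == 'F') = false := by simp [hF]
  have eR : (c == 'R') = false := by simp [hR]
  have eS' : (('S' : Char) == c) = false := by simp [Ne.symm hS]
  have eA' : (('A' : Char) == c) = false := by simp [Ne.symm hA]
  have eF' : (('F' : Char) == c) = false := by simp [Ne.symm hF]
  have eR' : (('R' : Char) == c) = false := by simp [Ne.symm hR]
  constructor
  · have hmk : flagMapping = PySem.Dict.mk [('S', 2), ('A', 16), ('F', 1), ('R', 4)] := by decide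
    rw [hmk]
    simp only [PySem.Dict.get?_mk_cons, eS', eA', eF', eR']
    rfl
  · simp [flagBitsB, List.lookup, eS, eA, eF, eR]

-- every mask buildMask produces extends the accumulator's bits
theorem buildMask_sup (l : List Char) : ∀ (a : Nat) (m : Int),
    buildMask ((a : Nat) : Int) l = some m →
    ∃ mn : Nat, m = ((mn : Nat) : Int) ∧ ∀ k, a.testBit k = true → mn.testBit k = true := by
  induction l with
  | nil =>
    intro a m h
    simp only [buildMask, Option.some.injEq] at h
    exact ⟨a, h.symm, fun k hk => hk⟩
  | cons c rest ih =>
    intro a m h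
    rcases lookup_cases c with ⟨_, h2⟩ | ⟨j, _, h2⟩
    · simp [buildMask, h2] at h
    · simp only [buildMask, h2] at h
      rw [PySem.Int.bor_natCast] at h
      obtain ⟨mn, hm, hsup⟩ := ih (a ||| 2 ^ j) m h
      refine ⟨mn, hm, fun k hk => hsup k ?_⟩
      simp [Nat.testBit_or, hk]

-- main loop correspondence: A's loop vs B's mask accumulation, for any satisfied accumulator
theorem loop_eq (p : Int) (l : List Char) : ∀ (a : Nat), psat p a →
    matchFlagLoop p l =
      (match buildMask ((a : Nat) : Int) l with
       | none => false
       | some m => decide (PySem.Int.band p m = m)) := by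
  induction l with
  | nil =>
    intro a ha
    simp only [matchFlagLoop, buildMask]
    have ha' : PySem.Int.band p ((a : Nat) : Int) = ((a : Nat) : Int) := ha
    exact (decide_eq_true ha').symm
  | cons c rest ih =>
    intro a ha
    rcases lookup_cases c with ⟨h1, h2⟩ | ⟨j, h1, h2⟩
    · simp [matchFlagLoop, buildMask, h1, h2]
    · simp only [matchFlagLoop, h1, buildMask, h2, PySem.Int.bor_natCast]
      by_cases hb : PySem.Int.band p ((2 ^ j : Nat) : Int) = 0
      · simp only [hb, if_true]
        cases hres : buildMask (((a ||| 2 ^ j : Nat) : Nat) : Int) rest with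
        | none => rfl
        | some m =>
          obtain ⟨mn, hm, hsup⟩ := buildMask_sup rest (a ||| 2 ^ j) m hres
          subst hm
          have hbit : mn.testBit j = true := by
            apply hsup
            simp [Nat.testBit_or]
          have hnot : ¬ PySem.Int.band p ((mn : Nat) : Int) = ((mn : Nat) : Int) := by
            intro hpm
            have hpm : psat p mn := hpm
            have : psat p (mn ||| 2 ^ j) := by rw [or_absorb_of_testBit mn j hbit]; exact hpm
            have := ((psat_or p mn (2 ^ j)).mp this).2
            exact (psat_pow_iff p j).mp this hb
          simpa using decide_eq_false hnot
      · simp only [hb, if_false]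
        have hv : psat p (2 ^ j) := (psat_pow_iff p j).mpr hb
        have : psat p (a ||| 2 ^ j) := (psat_or p a (2 ^ j)).mpr ⟨ha, hv⟩
        exact ih (a ||| 2 ^ j) this

-- ===== VERDICT (by name: the statement is the Claim_ definition above) =====
theorem match_flag_tcp_spec : Claim_equal_match_flag_tcp := by
  intro p s _
  unfold Spec_match_flag_tcp match_flag_tcp match_flag_tcp_alt
  have := loop_eq p s.toList 0 (psat_zero p)
  simpa using this
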